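-- pv_equiv track=rewrite | github.com/du-ntomazela/Sprint4_Py | main.py | solve_iterativo
-- ===== SOURCE A (Python) =====
-- def custo_pedido_intervalo(D, t, j, K, H, C):
--     custo = K
--     k = t
--     while k <= j:
--         custo += C * D[k]
--         custo += H * (j - k) * D[k]
--         k += 1
--     return custo
--
-- def solve_iterativo(D, K, H, C):
--     T = len(D)
--     V = [0] * (T + 1)
--     nxt = [0] * T
--     t = T - 1
--     while t >= 0:
--         melhor = 10**18
--         melhor_j = t
--         j = t
--         while j < T:
--             custo = custo_pedido_intervalo(D, t, j, K, H, C) + V[j + 1]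
--             if custo < melhor:
--                 melhor = custo
--                 melhor_j = j
--             j += 1
--         V[t] = melhor
--         nxt[t] = melhor_j
--         t -= 1
--     dias = []
--     t = 0
--     while t < T:
--         dias.append((t, nxt[t]))
--         t = nxt[t] + 1
--     return V[0], dias
-- ===== SOURCE B (Python) =====
-- def solve_iterativo(D, K, H, C):
--     T = len(D)
--     # prefix sums: P[i] = sum(D[:i]), W[i] = sum(k*D[k] for k < i)
--     P = [0] * (T + 1)
--     W = [0] * (T + 1)
--     for i in range(T):
--         P[i + 1] = P[i] + D[i]
--         W[i + 1] = W[i] + i * D[i]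
--
--     def cost(t, j):
--         s = P[j + 1] - P[t]
--         return K + C * s + H * (j * s - (W[j + 1] - W[t]))
--
--     V = [0] * (T + 1)
--     nxt = [0] * T
--     for t in range(T - 1, -1, -1):
--         V[t], nxt[t] = min([(10 ** 18, t)] +
--                            [(cost(t, j) + V[j + 1], j) for j in range(t, T)])
--
--     starts = []
--     t = 0
--     while t < T:
--         starts.append(t)
--         t = nxt[t] + 1
--     return V[0], [(s, nxt[s]) for s in starts]
-- ===== Notes on version B (the rewrite author's own statement) =====
-- stated objective: faster
-- what changed: B precomputes prefix sums of D and of k*D[k] once, evaluates each interval cost by a closed O(1) formula, selects each day's best order interval as a lexicographic min over a candidate list (with A's 10**18 cap as the sentinel candidate), and rebuilds the intervals in two phases (collect starts, then map), eliminating A's innermost cost-recomputation loop.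
import Mathlib
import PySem

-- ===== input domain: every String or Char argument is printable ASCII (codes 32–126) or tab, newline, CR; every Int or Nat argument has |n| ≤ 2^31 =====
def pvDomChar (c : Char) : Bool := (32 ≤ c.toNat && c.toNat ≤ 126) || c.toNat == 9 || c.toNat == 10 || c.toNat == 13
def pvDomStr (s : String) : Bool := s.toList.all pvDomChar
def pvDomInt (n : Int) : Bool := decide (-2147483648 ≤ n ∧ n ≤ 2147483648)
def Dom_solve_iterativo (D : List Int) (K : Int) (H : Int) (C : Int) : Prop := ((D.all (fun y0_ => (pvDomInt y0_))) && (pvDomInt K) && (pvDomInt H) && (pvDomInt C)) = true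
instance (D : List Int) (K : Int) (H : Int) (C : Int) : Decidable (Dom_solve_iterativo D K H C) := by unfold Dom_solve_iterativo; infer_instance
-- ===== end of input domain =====

-- B precomputes prefix sums and evaluates each interval cost by a closed formula,
-- choosing the best interval as a lexicographic min over candidates (objective: faster, O(T^2) vs O(T^3)).

-- ===== PORT A =====
-- the inner `while k <= j` loop of custo_pedido_intervalo
def custoLoop (D : List Int) (j : Nat) (H C : Int) (custo : Int) (k : Nat) : Int :=
  if k ≤ j then
    custoLoop D j H C (custo + C * D.getD k 0 + H * ((j : Int) - (k : Int)) * D.getD k 0) (k + 1)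
  else custo
termination_by j + 1 - k

-- indices t..j are always in range in solve_iterativo, so getD is exact for D[k]
def custo_pedido_intervalo (D : List Int) (t j : Nat) (K H C : Int) : Int :=
  custoLoop D j H C K t

-- the `while j < T` loop: state (melhor, melhor_j)
def innerA (D V : List Int) (T : Nat) (K H C : Int) (t : Nat) (melhor : Int) (mj : Nat) (j : Nat) : Int × Nat :=
  if j < T then
    let custo := custo_pedido_intervalo D t j K H C + V.getD (j + 1) 0
    if custo < melhor then innerA D V T K H C t custo j (j + 1)
    else innerA D V T K H C t melhor mj (j + 1)
  else (melhor, mj)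
termination_by T - j

-- the `while t >= 0` loop, counting down; i = t + 1
def tLoopA (D : List Int) (T : Nat) (K H C : Int) (V : List Int) (nxt : List Nat) (i : Nat) : List Int × List Nat :=
  match i with
  | 0 => (V, nxt)
  | i + 1 =>
      let r := innerA D V T K H C i (10 ^ 18) i i
      tLoopA D T K H C (V.set i r.1) (nxt.set i r.2) i

-- reconstruction `while t < T`; nxt stores non-negative indices (Python ints ≥ t),
-- so Nat entries are exact; t strictly increases, hence fuel = T is never exhausted
def diasLoop (nxt : List Nat) (T : Nat) (fuel t : Nat) (acc : List (Int × Int)) : List (Int × Int) :=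
  match fuel with
  | 0 => acc
  | fuel + 1 =>
      if t < T then diasLoop nxt T fuel (nxt.getD t 0 + 1) (acc ++ [((t : Int), (nxt.getD t 0 : Int))])
      else acc

def solve_iterativo (D : List Int) (K : Int) (H : Int) (C : Int) : Int × (List (Int × Int)) :=
  let T := D.length
  let r := tLoopA D T K H C (List.replicate (T + 1) 0) (List.replicate T 0) T
  (r.1.getD 0 0, diasLoop r.2 T T 0 [])

-- ===== PORT B =====
-- the `for i in range(T)` prefix-sum pass filling P and W in place
def buildPW (D : List Int) (T : Nat) (P W : List Int) (i : Nat) : List Int × List Int :=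
  if i < T then
    buildPW D T (P.set (i + 1) (P.getD i 0 + D.getD i 0))
               (W.set (i + 1) (W.getD i 0 + (i : Int) * D.getD i 0)) (i + 1)
  else (P, W)
termination_by T - i

-- the closed-form `cost(t, j)` from prefix sums
def costPW (P W : List Int) (K H C : Int) (t j : Nat) : Int :=
  let s := P.getD (j + 1) 0 - P.getD t 0
  K + C * s + H * ((j : Int) * s - (W.getD (j + 1) 0 - W.getD t 0))

-- Python's tuple `min` comparison: lexicographic, keeping the earlier element on ties
def lexMin2 (a b : Int × Nat) : Int × Nat :=
  if b.1 < a.1 ∨ (b.1 = a.1 ∧ b.2 < a.2) then b else a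

-- the `for t in range(T-1, -1, -1)` loop; each step is `min` over the candidate list; i = t + 1
def tLoopB (P W : List Int) (T : Nat) (K H C : Int) (V : List Int) (nxt : List Nat) (i : Nat) : List Int × List Nat :=
  match i with
  | 0 => (V, nxt)
  | i + 1 =>
      let r := ((List.range' i (T - i)).map
          (fun j => (costPW P W K H C i j + V.getD (j + 1) 0, j))).foldl lexMin2 ((10 : Int) ^ 18, i)
      tLoopB P W T K H C (V.set i r.1) (nxt.set i r.2) i

-- first reconstruction pass: the `while t < T` loop collecting the interval starts
def startsLoop (nxt : List Nat) (T : Nat) (fuel t : Nat) (acc : List Nat) : List Nat :=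
  match fuel with
  | 0 => acc
  | fuel + 1 =>
      if t < T then startsLoop nxt T fuel (nxt.getD t 0 + 1) (acc ++ [t])
      else acc

def solve_iterativo_alt (D : List Int) (K : Int) (H : Int) (C : Int) : Int × (List (Int × Int)) :=
  let T := D.length
  let pw := buildPW D T (List.replicate (T + 1) 0) (List.replicate (T + 1) 0) 0
  let r := tLoopB pw.1 pw.2 T K H C (List.replicate (T + 1) 0) (List.replicate T 0) T
  let starts := startsLoop r.2 T T 0 []
  (r.1.getD 0 0, starts.map (fun (s : Nat) => ((s : Int), (r.2.getD s 0 : Int))))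

-- ===== PRECONDITION & SPEC =====
def Spec_solve_iterativo (D : List Int) (K : Int) (H : Int) (C : Int) (out : Int × (List (Int × Int))) : Prop := out = solve_iterativo_alt D K H C
instance (D : List Int) (K : Int) (H : Int) (C : Int) (out : Int × (List (Int × Int))) : Decidable (Spec_solve_iterativo D K H C out) := by unfold Spec_solve_iterativo; infer_instance

-- ===== CLAIM (what is proved, stated in full; the proofs are below) =====
def Claim_equal_solve_iterativo : Prop := ∀ (D : List Int) (K : Int) (H : Int) (C : Int), Dom_solve_iterativo D K H C → Spec_solve_iterativo D K H C (solve_iterativo D K H C)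

-- ===== LEMMAS AND PROOFS =====

-- proof-side closed prefix sums
def sPre (D : List Int) : Nat → Int
  | 0 => 0
  | k + 1 => sPre D k + D.getD k 0

def wPre (D : List Int) : Nat → Int
  | 0 => 0
  | k + 1 => wPre D k + (k : Int) * D.getD k 0

theorem getD_set_int (l : List Int) (i k : Nat) (v : Int) (h : i < l.length) :
    (l.set i v).getD k 0 = if i = k then v else l.getD k 0 := by
  simp only [List.getD_eq_getElem?_getD, List.getElem?_set]
  split_ifs with h1
  · subst h1; simp
  · rfl

theorem buildPW_spec (D : List Int) (T : Nat) (P W : List Int) (i : Nat)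
    (hPl : P.length = T + 1) (hWl : W.length = T + 1) (hi : i ≤ T)
    (hPk : ∀ k, k ≤ i → P.getD k 0 = sPre D k)
    (hWk : ∀ k, k ≤ i → W.getD k 0 = wPre D k) :
    (∀ k, k ≤ T → (buildPW D T P W i).1.getD k 0 = sPre D k) ∧
    (∀ k, k ≤ T → (buildPW D T P W i).2.getD k 0 = wPre D k) := by
  rw [buildPW]
  split_ifs with h
  · refine buildPW_spec D T _ _ (i + 1) (by simp [hPl]) (by simp [hWl]) (by omega) ?_ ?_
    · intro k hk
      rw [getD_set_int _ _ _ _ (by omega)]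
      split_ifs with he
      · subst he; rw [hPk i (le_refl _)]; rfl
      · exact hPk k (by omega)
    · intro k hk
      rw [getD_set_int _ _ _ _ (by omega)]
      split_ifs with he
      · subst he; rw [hWk i (le_refl _)]; rfl
      · exact hWk k (by omega)
  · exact ⟨fun k hk => hPk k (by omega), fun k hk => hWk k (by omega)⟩
termination_by T - i

theorem custoLoop_closed (D : List Int) (j : Nat) (H C a : Int) (t : Nat) (h : t ≤ j + 1) :
    custoLoop D j H C a t
      = a + C * (sPre D (j + 1) - sPre D t)
          + H * ((j : Int) * (sPre D (j + 1) - sPre D t) - (wPre D (j + 1) - wPre D t)) := by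
  rw [custoLoop]
  split_ifs with hk
  · rw [custoLoop_closed D j H C _ (t + 1) (by omega)]
    have hs : sPre D (t + 1) = sPre D t + D.getD t 0 := rfl
    have hw : wPre D (t + 1) = wPre D t + (t : Int) * D.getD t 0 := rfl
    rw [hs, hw]; ring
  · have : t = j + 1 := by omega
    subst this; ring
termination_by j + 1 - t

theorem costPW_eq (D P W : List Int) (T : Nat) (K H C : Int) (t j : Nat)
    (hP : ∀ k, k ≤ T → P.getD k 0 = sPre D k)
    (hW : ∀ k, k ≤ T → W.getD k 0 = wPre D k)
    (ht : t ≤ j) (hj : j < T) :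
    costPW P W K H C t j = custo_pedido_intervalo D t j K H C := by
  rw [costPW, custo_pedido_intervalo, custoLoop_closed D j H C K t (by omega),
    hP (j + 1) (by omega), hP t (by omega), hW (j + 1) (by omega), hW t (by omega)]

theorem inner_fold (D V : List Int) (T : Nat) (K H C : Int) (t : Nat) (m : Int) (mj j : Nat)
    (hmj : mj ≤ j) :
    ((List.range' j (T - j)).map
        (fun j' => (custo_pedido_intervalo D t j' K H C + V.getD (j' + 1) 0, j'))).foldl lexMin2 (m, mj)
      = innerA D V T K H C t m mj j := by
  rw [innerA]
  split_ifs with h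
  · obtain ⟨n, hn⟩ : ∃ n, T - j = n + 1 := ⟨T - j - 1, by omega⟩
    rw [hn, List.range'_succ, List.map_cons, List.foldl_cons]
    have hn' : T - (j + 1) = n := by omega
    have hlex : lexMin2 (m, mj) (custo_pedido_intervalo D t j K H C + V.getD (j + 1) 0, j)
        = if custo_pedido_intervalo D t j K H C + V.getD (j + 1) 0 < m
          then (custo_pedido_intervalo D t j K H C + V.getD (j + 1) 0, j) else (m, mj) := by
      rw [lexMin2]
      split_ifs with h1 h2 h2
      · rfl
      · rcases h1 with h1 | ⟨_, h1⟩
        · exact absurd h1 h2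
        · omega
      · exact absurd (Or.inl h2) h1
      · rfl
    rw [hlex]
    simp only
    split_ifs with hc
    · rw [← hn', inner_fold D V T K H C t _ j (j + 1) (by omega)]
    · rw [← hn', inner_fold D V T K H C t m mj (j + 1) (by omega)]
  · have : T - j = 0 := by omega
    rw [this]; rfl
termination_by T - j

theorem tLoop_eq (D : List Int) (T : Nat) (K H C : Int) (P W : List Int)
    (hP : ∀ k, k ≤ T → P.getD k 0 = sPre D k)
    (hW : ∀ k, k ≤ T → W.getD k 0 = wPre D k)
    (V : List Int) (nxt : List Nat) (i : Nat) (hi : i ≤ T) :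
    tLoopB P W T K H C V nxt i = tLoopA D T K H C V nxt i := by
  induction i generalizing V nxt with
  | zero => rfl
  | succ i ih =>
      rw [tLoopB, tLoopA]
      have hmap : (List.range' i (T - i)).map
            (fun j => (costPW P W K H C i j + V.getD (j + 1) 0, j))
          = (List.range' i (T - i)).map
            (fun j => (custo_pedido_intervalo D i j K H C + V.getD (j + 1) 0, j)) := by
        apply List.map_congr_left
        intro j hj
        rw [List.mem_range'_1] at hj
        rw [costPW_eq D P W T K H C i j hP hW hj.1 (by omega)]
      simp only [hmap, inner_fold D V T K H C i ((10:Int)^18) i i (le_refl _)]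
      exact ih _ _ (by omega)

theorem startsLoop_acc (nxt : List Nat) (T : Nat) (fuel : Nat) (t : Nat) (acc : List Nat) :
    startsLoop nxt T fuel t acc = acc ++ startsLoop nxt T fuel t [] := by
  induction fuel generalizing t acc with
  | zero => simp [startsLoop]
  | succ fuel ih =>
      rw [startsLoop, startsLoop]
      split_ifs with h
      · rw [ih _ (acc ++ [t]), ih _ ([] ++ [t])]; simp
      · simp

theorem dias_eq (nxt : List Nat) (T : Nat) (fuel t : Nat) (acc : List (Int × Int)) :
    diasLoop nxt T fuel t acc
      = acc ++ (startsLoop nxt T fuel t []).map (fun (s : Nat) => ((s : Int), (nxt.getD s 0 : Int))) := by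
  induction fuel generalizing t acc with
  | zero => simp [diasLoop, startsLoop]
  | succ fuel ih =>
      rw [diasLoop, startsLoop]
      split_ifs with h
      · rw [ih, startsLoop_acc nxt T fuel _ ([] ++ [t])]; simp
      · simp

-- ===== VERDICT (by name: the statement is the Claim_ definition above) =====
theorem solve_iterativo_spec : Claim_equal_solve_iterativo := by
  intro D K H C _
  unfold Spec_solve_iterativo solve_iterativo solve_iterativo_alt
  have hbuild := buildPW_spec D D.length (List.replicate (D.length + 1) 0)
      (List.replicate (D.length + 1) 0) 0 (by simp) (by simp) (by omega)
      (by intro k hk; interval_cases k; simp [sPre])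
      (by intro k hk; interval_cases k; simp [wPre])
  simp only [tLoop_eq D D.length K H C _ _ hbuild.1 hbuild.2 _ _ D.length (le_refl _),
    dias_eq, List.nil_append]
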